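-- pv_equiv track=rewrite | github.com/roncuevas/Polymorphism | Controllers/xfasta.py | get_fasta_variants
-- ===== SOURCE A (Python) =====
-- def get_fasta_variants(data):
--     labels = list()
--     var = ""
--     for variant in data:
--         for char in variant[0]:
--             if char == ">":
--                 continue
--             elif char == " ":
--                 labels.append(var)
--                 var = ""
--                 break
--             else:
--                 var += char
--     return labels
-- ===== SOURCE B (Python) =====
-- def get_fasta_variants(data):
--     labels = []
--     carry = ""
--     for variant in data:
--         s = variant[0]
--         i = s.find(" ")
--         if i == -1:
--             carry += s.replace(">", "")
--         else:
--             labels.append(carry + s[:i].replace(">", ""))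
--             carry = ""
--     return labels
-- ===== Notes on version B (the rewrite author's own statement) =====
-- stated objective: idiomatic
-- what changed: B drops A's character-by-character inner loop (with continue/break and a character accumulator) and instead locates the first space with str.find, slices the prefix and strips '>' with str.replace, keeping the prefix carried across space-less entries as an explicit variable.
import Mathlib
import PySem

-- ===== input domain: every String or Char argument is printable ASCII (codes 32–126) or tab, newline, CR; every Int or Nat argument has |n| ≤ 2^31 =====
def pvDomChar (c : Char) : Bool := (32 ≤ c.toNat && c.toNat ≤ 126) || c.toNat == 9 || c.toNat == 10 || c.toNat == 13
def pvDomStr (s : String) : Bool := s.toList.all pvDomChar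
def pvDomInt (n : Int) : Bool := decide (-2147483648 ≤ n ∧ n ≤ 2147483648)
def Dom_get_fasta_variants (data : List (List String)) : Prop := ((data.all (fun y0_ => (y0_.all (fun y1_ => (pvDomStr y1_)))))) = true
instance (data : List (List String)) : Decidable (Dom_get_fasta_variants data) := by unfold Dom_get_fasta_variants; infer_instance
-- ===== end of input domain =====

-- B replaces A's character-by-character inner loop (with break/continue) by locating the
-- first space with find and slicing/replacing, keeping the carried-over prefix explicit
-- (objective: idiomatic).  Return-value equivalence only; neither version mutates its input.

-- ===== PORT A =====
-- inner 'for char in variant[0]' loop: state (labels, var); break on ' ' ends the entry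
def pvA_scan : List Char → List String × List Char → List String × List Char
  | [], st => st
  | c :: cs, (labels, var) =>
    if c = '>' then pvA_scan cs (labels, var)
    else if c = ' ' then (labels ++ [String.ofList var], [])
    else pvA_scan cs (labels, var ++ [c])

def get_fasta_variants (data : List (List String)) : List String :=
  -- variant[0]: PySem.List.pyGet? v 0; Pre_ excludes the empty variant on which Python raises IndexError
  (data.foldl (fun st v => pvA_scan ((PySem.List.pyGet? v 0).getD "").toList st) ([], [])).1

-- ===== PORT B =====
def get_fasta_variants_alt (data : List (List String)) : List String :=
  (data.foldl (fun st v =>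
      let s := ((PySem.List.pyGet? v 0).getD "").toList
      let i := PySem.Chars.find s [' ']
      if i = -1 then (st.1, st.2 ++ PySem.Chars.replace s ['>'] [])
      else (st.1 ++ [String.ofList (st.2 ++ PySem.Chars.replace (PySem.Chars.slice s none (some i)) ['>'] [])], []))
    ([], [])).1

-- ===== PRECONDITION & SPEC =====
-- Pre_ excludes exactly the inputs containing an empty entry, on which Python's variant[0] raises IndexError.
def Pre_get_fasta_variants (data : List (List String)) : Prop := ∀ v ∈ data, v ≠ []
instance (data : List (List String)) : Decidable (Pre_get_fasta_variants data) := by unfold Pre_get_fasta_variants; infer_instance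

def pvWitness_get_fasta_variants : List (List String) := [[">seq1 extra"], ["nospace"], [">seq2 tail"]]

def Spec_get_fasta_variants (data : List (List String)) (out : List String) : Prop := out = get_fasta_variants_alt data
instance (data : List (List String)) (out : List String) : Decidable (Spec_get_fasta_variants data out) := by unfold Spec_get_fasta_variants; infer_instance

-- ===== CLAIM (what is proved, stated in full; the proofs are below) =====
def Claim_equal_get_fasta_variants : Prop := ∀ (data : List (List String)), Dom_get_fasta_variants data → Pre_get_fasta_variants data → Spec_get_fasta_variants data (get_fasta_variants data)

-- ===== LEMMAS AND PROOFS =====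

-- str.replace(">", "") removes every '>'
theorem pv_replace_go_filter (l : List Char) : ∀ (fuel : Nat) (acc : List Char),
    l.length ≤ fuel →
    PySem.Chars.replace.go ['>'] [] fuel l acc = acc.reverse ++ l.filter (fun c => c ≠ '>') := by
  induction l with
  | nil =>
      intro fuel acc _
      cases fuel <;> simp [PySem.Chars.replace.go]
  | cons c t ih =>
      intro fuel acc hle
      cases fuel with
      | zero => simp at hle
      | succ f =>
        by_cases hc : c = '>'
        · subst hc
          simp [PySem.Chars.replace.go, List.isPrefixOf, ih f acc (by simpa using hle)]
        · have hc' : ¬ ('>' = c) := fun e => hc e.symm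
          simp [PySem.Chars.replace.go, List.isPrefixOf, hc',
            ih f (c :: acc) (by simpa using hle), List.filter_cons, hc]

theorem pv_replace_filter (l : List Char) :
    PySem.Chars.replace l ['>'] [] = l.filter (fun c => c ≠ '>') := by
  simpa using pv_replace_go_filter l l.length [] (le_refl _)

-- find.go on a list without ' '
theorem pv_find_go_none (l : List Char) : ∀ (k : Nat), ' ' ∉ l →
    PySem.Chars.find.go [' '] l k = -1 := by
  induction l with
  | nil => intro k _; simp [PySem.Chars.find.go]
  | cons c t ih =>
      intro k h
      have hc : ¬ (' ' = c) := by
        intro e; exact h (by simp [← e])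
      simp [PySem.Chars.find.go, List.isPrefixOf, hc,
        ih (k + 1) (fun hm => h (List.mem_cons_of_mem _ hm))]

-- find.go on t ++ ' ' :: r with ' ' ∉ t points at t.length
theorem pv_find_go_split (t : List Char) : ∀ (r : List Char) (k : Nat), ' ' ∉ t →
    PySem.Chars.find.go [' '] (t ++ ' ' :: r) k = (k : Int) + t.length := by
  induction t with
  | nil => intro r k _; simp [PySem.Chars.find.go, List.isPrefixOf]
  | cons c t ih =>
      intro r k h
      have hc : ¬ (' ' = c) := by
        intro e; exact h (by simp [← e])
      have := ih r (k + 1) (fun hm => h (List.mem_cons_of_mem _ hm))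
      simp [PySem.Chars.find.go, List.isPrefixOf, hc, this]
      ring

-- A's inner loop on a string without ' ': everything but '>' is appended to var
theorem pv_scan_none (l : List Char) : ∀ (labels : List String) (var : List Char), ' ' ∉ l →
    pvA_scan l (labels, var) = (labels, var ++ l.filter (fun c => c ≠ '>')) := by
  induction l with
  | nil => intro labels var _; simp [pvA_scan]
  | cons c t ih =>
      intro labels var h
      have hc : c ≠ ' ' := by
        intro e; exact h (by simp [e])
      have ht : ' ' ∉ t := fun hm => h (List.mem_cons_of_mem _ hm)
      by_cases hg : c = '>'
      · subst hg; simp [pvA_scan, ih labels var ht]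
      · simp [pvA_scan, hc, hg, ih labels (var ++ [c]) ht, List.filter_cons]

-- A's inner loop up to the first ' ': label emitted, var reset
theorem pv_scan_split (t : List Char) : ∀ (r : List Char) (labels : List String) (var : List Char),
    ' ' ∉ t →
    pvA_scan (t ++ ' ' :: r) (labels, var) =
      (labels ++ [String.ofList (var ++ t.filter (fun c => c ≠ '>'))], []) := by
  induction t with
  | nil => intro r labels var _; simp [pvA_scan]
  | cons c t ih =>
      intro r labels var h
      have hc : c ≠ ' ' := by
        intro e; exact h (by simp [e])
      have ht : ' ' ∉ t := fun hm => h (List.mem_cons_of_mem _ hm)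
      by_cases hg : c = '>'
      · subst hg; simp [pvA_scan, ih r labels var ht]
      · simp [pvA_scan, hc, hg, ih r labels (var ++ [c]) ht, List.filter_cons]

-- one entry: A's char scan equals B's find/slice/replace step
theorem pv_step_eq (l : List Char) (labels : List String) (var : List Char) :
    pvA_scan l (labels, var) =
      (if PySem.Chars.find l [' '] = -1
       then (labels, var ++ PySem.Chars.replace l ['>'] [])
       else (labels ++ [String.ofList (var ++ PySem.Chars.replace
              (PySem.Chars.slice l none (some (PySem.Chars.find l [' ']))) ['>'] [])], [])) := by
  by_cases h : ' ' ∈ l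
  · obtain ⟨t, r, hl, ht⟩ : ∃ t r, l = t ++ ' ' :: r ∧ ' ' ∉ t := by
      clear labels var
      induction l with
      | nil => simp at h
      | cons c cs ih =>
          by_cases hc : c = ' '
          · exact ⟨[], cs, by simp [hc], by simp⟩
          · have hm : ' ' ∈ cs := by
              rcases List.mem_cons.mp h with h1 | h1
              · exact absurd h1.symm hc
              · exact h1
            obtain ⟨t, r, h1, h2⟩ := ih hm
            exact ⟨c :: t, r, by simp [h1], by
              intro hx
              rcases List.mem_cons.mp hx with e | e
              · exact hc e.symm
              · exact h2 e⟩
    subst hl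
    have hfind : PySem.Chars.find (t ++ ' ' :: r) [' '] = (t.length : Int) := by
      have := pv_find_go_split t r 0 ht
      simpa [PySem.Chars.find] using this
    have hne : PySem.Chars.find (t ++ ' ' :: r) [' '] ≠ -1 := by
      rw [hfind]; omega
    rw [if_neg hne, hfind]
    have hslice : PySem.Chars.slice (t ++ ' ' :: r) none (some (t.length : Int)) = t := by
      rw [PySem.Chars.slice_eq_listSlice, PySem.List.slice_to_natCast]
      simp
    rw [hslice, pv_replace_filter, pv_scan_split t r labels var ht]
  · have hfind : PySem.Chars.find l [' '] = -1 := by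
      have := pv_find_go_none l 0 h
      simpa [PySem.Chars.find] using this
    rw [if_pos hfind, pv_replace_filter, pv_scan_none l labels var h]

theorem pv_fold_eq (data : List (List String)) : ∀ (st : List String × List Char),
    data.foldl (fun st v => pvA_scan ((PySem.List.pyGet? v 0).getD "").toList st) st =
    data.foldl (fun st v =>
      let s := ((PySem.List.pyGet? v 0).getD "").toList
      let i := PySem.Chars.find s [' ']
      if i = -1 then (st.1, st.2 ++ PySem.Chars.replace s ['>'] [])
      else (st.1 ++ [String.ofList (st.2 ++ PySem.Chars.replace (PySem.Chars.slice s none (some i)) ['>'] [])], [])) st := by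
  induction data with
  | nil => intro st; rfl
  | cons v rest ih =>
      intro st
      simp only [List.foldl_cons]
      rw [← ih]
      congr 1
      obtain ⟨labels, var⟩ := st
      exact pv_step_eq _ labels var

-- ===== VERDICT (by name: the statement is the Claim_ definition above) =====
theorem get_fasta_variants_spec : Claim_equal_get_fasta_variants := by
  intro data _ _
  unfold Spec_get_fasta_variants get_fasta_variants get_fasta_variants_alt
  rw [pv_fold_eq]
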